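-- pv_equiv track=rewrite | github.com/stanfordnlp/stanza | stanza/models/tokenization/data.py | filter_consecutive_whitespaces
-- ===== SOURCE A (Python) =====
-- def filter_consecutive_whitespaces(para):
--     filtered = []
--     for i, (char, label) in enumerate(para):
--         if i > 0:
--             if char == ' ' and para[i-1][0] == ' ':
--                 continue
--
--         filtered.append((char, label))
--
--     return filtered
-- ===== SOURCE B (Python) =====
-- def filter_consecutive_whitespaces(para):
--     # Stage 1: split para into maximal runs of equal "is-space" key.
--     runs = []
--     for item in para:
--         is_sp = (item[0] == ' ')
--         if runs and runs[-1][0] == is_sp: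
--             runs[-1][1].append(item)
--         else:
--             runs.append((is_sp, [item]))
--     # Stage 2: emit — first element of each space run, every element of other runs.
--     out = []
--     for is_sp, run in runs:
--         if is_sp:
--             out.append(run[0])
--         else:
--             out.extend(run)
--     return out
-- ===== Notes on version B (the rewrite author's own statement) =====
-- stated objective: alternative
-- what changed: B works in two staged passes over an explicit run data structure: it first groups para into maximal runs keyed by (char == ' '), then emits the first element of each space run and all elements of non-space runs, instead of A's single indexed scan comparing each element with para[i-1].
import Mathlib
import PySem

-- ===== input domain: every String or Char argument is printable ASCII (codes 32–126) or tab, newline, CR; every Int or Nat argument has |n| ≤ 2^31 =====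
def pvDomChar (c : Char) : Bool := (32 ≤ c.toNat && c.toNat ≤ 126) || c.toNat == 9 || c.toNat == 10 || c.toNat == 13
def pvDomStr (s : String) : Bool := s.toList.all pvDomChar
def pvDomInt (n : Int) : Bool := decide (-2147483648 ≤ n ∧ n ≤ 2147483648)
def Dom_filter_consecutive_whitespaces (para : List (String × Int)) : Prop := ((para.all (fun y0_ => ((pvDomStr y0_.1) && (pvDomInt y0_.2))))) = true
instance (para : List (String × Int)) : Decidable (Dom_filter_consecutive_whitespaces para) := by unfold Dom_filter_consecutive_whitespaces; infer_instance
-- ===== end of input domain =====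

-- B groups para into maximal runs keyed by (char == ' ') in a first pass, then in a
-- second pass emits the first element of each space run and all elements of other runs;
-- objective: alternative two-stage decomposition, same O(n) cost.

-- ===== PORT A =====
def filter_consecutive_whitespaces (para : List (String × Int)) : List (String × Int) :=
  (PySem.List.enumerate para).foldl
    (fun filtered p =>
      if p.1 > 0 ∧ p.2.1 = " " ∧ ((PySem.List.pyGet? para (p.1 - 1)).map Prod.fst = some " ")
      then filtered
      else filtered ++ [p.2])
    []

-- ===== PORT B =====
-- Stage-1 loop body: append item to the last run if its key matches, else start a new run.
def pvStep (runs : List (Bool × List (String × Int))) (item : String × Int) :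
    List (Bool × List (String × Int)) :=
  let isSp := decide (item.1 = " ")
  match runs.getLast? with
  | some last =>
      if last.1 = isSp then runs.dropLast ++ [(last.1, last.2 ++ [item])]
      else runs ++ [(isSp, [item])]
  | none => runs ++ [(isSp, [item])]

def filter_consecutive_whitespaces_alt (para : List (String × Int)) : List (String × Int) :=
  let runs := para.foldl pvStep []
  runs.foldl (fun out r => if r.1 then out ++ [r.2.head!] else out ++ r.2) []

-- ===== PRECONDITION & SPEC =====
def Spec_filter_consecutive_whitespaces (para : List (String × Int)) (out : List (String × Int)) : Prop := out = filter_consecutive_whitespaces_alt para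
instance (para : List (String × Int)) (out : List (String × Int)) : Decidable (Spec_filter_consecutive_whitespaces para out) := by unfold Spec_filter_consecutive_whitespaces; infer_instance

-- ===== CLAIM (what is proved, stated in full; the proofs are below) =====
def Claim_equal_filter_consecutive_whitespaces : Prop := ∀ (para : List (String × Int)), Dom_filter_consecutive_whitespaces para → Spec_filter_consecutive_whitespaces para (filter_consecutive_whitespaces para)

-- ===== LEMMAS AND PROOFS =====

-- reference function: predecessor-was-space recursion
def pvGo (prevSpace : Bool) : List (String × Int) → List (String × Int)
  | [] => []
  | x :: xs =>
    if prevSpace ∧ x.1 = " " then pvGo true xs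
    else x :: pvGo (decide (x.1 = " ")) xs

-- what stage 2 emits for one run
def pvEmitRun (r : Bool × List (String × Int)) : List (String × Int) :=
  if r.1 then [r.2.head!] else r.2

lemma emit_foldl (rs : List (Bool × List (String × Int))) (acc : List (String × Int)) :
    rs.foldl (fun out r => if r.1 then out ++ [r.2.head!] else out ++ r.2) acc
      = acc ++ rs.flatMap pvEmitRun := by
  induction rs generalizing acc with
  | nil => simp
  | cons r rs ih =>
    by_cases h : r.1 <;> simp [h, ih, pvEmitRun, List.flatMap_cons]

lemma pvStep_last (rs : List (Bool × List (String × Int))) (b : Bool)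
    (r : List (String × Int)) (x : String × Int) :
    pvStep (rs ++ [(b, r)]) x =
      if b = decide (x.1 = " ") then rs ++ [(b, r ++ [x])]
      else (rs ++ [(b, r)]) ++ [(decide (x.1 = " "), [x])] := by
  simp [pvStep]

lemma grouped_emit (xs : List (String × Int)) (b : Bool) (r : List (String × Int))
    (rs : List (Bool × List (String × Int))) (hr : r ≠ []) :
    (xs.foldl pvStep (rs ++ [(b, r)])).flatMap pvEmitRun
      = rs.flatMap pvEmitRun ++ pvEmitRun (b, r) ++ pvGo b xs := by
  induction xs generalizing b r rs with
  | nil => simp [pvGo]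
  | cons x xs ih =>
    rw [List.foldl_cons, pvStep_last]
    by_cases hb : b = decide (x.1 = " ")
    · rw [if_pos hb]
      rw [ih b (r ++ [x]) rs (by simp)]
      obtain ⟨a, as, rfl⟩ : ∃ a as, r = a :: as := by
        cases r with | nil => exact absurd rfl hr | cons a as => exact ⟨a, as, rfl⟩
      cases b with
      | true =>
        have hx : x.1 = " " := by simpa using hb.symm
        simp [pvEmitRun, pvGo, hx]
      | false =>
        have hx : ¬ x.1 = " " := by simpa using hb.symm
        simp [pvEmitRun, pvGo, hx]
    · rw [if_neg hb]
      rw [ih (decide (x.1 = " ")) [x] (rs ++ [(b, r)]) (by simp)]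
      cases hx : decide (x.1 = " ") with
      | true =>
        have hx' : x.1 = " " := of_decide_eq_true hx
        have hbf : b = false := by cases b <;> simp_all
        simp [pvEmitRun, pvGo, hx', hbf]
      | false =>
        have hx' : ¬ x.1 = " " := of_decide_eq_false hx
        have hbt : b = true := by cases b <;> simp_all
        simp [pvEmitRun, pvGo, hx', hbt]

lemma alt_eq_pvGo (para : List (String × Int)) :
    filter_consecutive_whitespaces_alt para = pvGo false para := by
  cases para with
  | nil => rfl
  | cons x xs =>
    unfold filter_consecutive_whitespaces_alt
    rw [List.foldl_cons, emit_foldl]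
    have h0 : pvStep [] x = [] ++ [(decide (x.1 = " "), [x])] := by simp [pvStep]
    rw [h0, grouped_emit xs (decide (x.1 = " ")) [x] [] (by simp)]
    cases hx : decide (x.1 = " ") with
    | true =>
      have hx' : x.1 = " " := of_decide_eq_true hx
      simp [pvEmitRun, pvGo, hx']
    | false =>
      have hx' : ¬ x.1 = " " := of_decide_eq_false hx
      simp [pvEmitRun, pvGo, hx']

def pvPrevSpace (pre : List (String × Int)) : Bool :=
  match pre.getLast? with
  | some y => decide (y.1 = " ")
  | none => false

lemma a_foldl_eq_pvGo (para pre suf acc : List (String × Int))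
    (hsplit : para = pre ++ suf) :
    (PySem.List.enumerate suf (pre.length : Int)).foldl
      (fun filtered p =>
        if p.1 > 0 ∧ p.2.1 = " " ∧ ((PySem.List.pyGet? para (p.1 - 1)).map Prod.fst = some " ")
        then filtered
        else filtered ++ [p.2]) acc
      = acc ++ pvGo (pvPrevSpace pre) suf := by
  induction suf generalizing pre acc with
  | nil => simp [PySem.List.enumerate, pvGo]
  | cons x xs ih =>
    rw [PySem.List.enumerate_cons, List.foldl_cons]
    have hsplit' : para = (pre ++ [x]) ++ xs := by rw [hsplit]; simp
    have hlen : ((pre ++ [x]).length : Int) = (pre.length : Int) + 1 := by simp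
    have hps : pvPrevSpace (pre ++ [x]) = decide (x.1 = " ") := by
      simp [pvPrevSpace]
    have hnext : ∀ acc' : List (String × Int),
        (PySem.List.enumerate xs ((pre.length : Int) + 1)).foldl
          (fun filtered p =>
            if p.1 > 0 ∧ p.2.1 = " " ∧ ((PySem.List.pyGet? para (p.1 - 1)).map Prod.fst = some " ")
            then filtered
            else filtered ++ [p.2]) acc'
          = acc' ++ pvGo (decide (x.1 = " ")) xs := by
      intro acc'
      have h := ih (pre ++ [x]) acc' hsplit'
      rw [hlen, hps] at h
      exact h
    cases pre with
    | nil =>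
      have hcond : ¬ (((0 : Int) > 0) ∧ x.1 = " " ∧
          ((PySem.List.pyGet? para ((0 : Int) - 1)).map Prod.fst = some " ")) := by
        rintro ⟨h0, -⟩; exact absurd h0 (by norm_num)
      simp only [List.length_nil, Nat.cast_zero] at hnext ⊢
      simp only [hcond, if_false]
      rw [hnext _]
      by_cases hx : x.1 = " " <;> simp [pvGo, pvPrevSpace, hx]
    | cons q qs =>
      have hidx : ((q :: qs).length : Int) - 1 = ((qs.length : Nat) : Int) := by
        simp
      obtain ⟨y, hy⟩ : ∃ y, (q :: qs).getLast? = some y := by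
        cases h : (q :: qs).getLast? with
        | none => simp at h
        | some z => exact ⟨z, rfl⟩
      have hget : PySem.List.pyGet? para ((qs.length : Nat) : Int) = some y := by
        rw [PySem.List.pyGet?_natCast, hsplit, List.getElem?_append_left (by simp)]
        rw [← hy, List.getLast?_eq_getElem?]
        simp
      have hpos : ((q :: qs).length : Int) > 0 := by simp
      have hpsv : pvPrevSpace (q :: qs) = decide (y.1 = " ") := by
        unfold pvPrevSpace; rw [hy]
      by_cases hcase : x.1 = " " ∧ y.1 = " "
      · have : (((q :: qs).length : Int) > 0 ∧ x.1 = " " ∧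
            ((PySem.List.pyGet? para (((q :: qs).length : Int) - 1)).map Prod.fst = some " ")) := by
          refine ⟨hpos, hcase.1, ?_⟩
          rw [hidx, hget]; simp [hcase.2]
        rw [if_pos this, hnext _]
        simp [pvGo, hpsv, hcase.1, hcase.2]
      · have : ¬ (((q :: qs).length : Int) > 0 ∧ x.1 = " " ∧
            ((PySem.List.pyGet? para (((q :: qs).length : Int) - 1)).map Prod.fst = some " ")) := by
          rintro ⟨-, hx, hprev⟩
          rw [hidx, hget] at hprev
          simp at hprev
          exact hcase ⟨hx, hprev⟩
        rw [if_neg this, hnext _]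
        by_cases hx : x.1 = " "
        · have hl : y.1 ≠ " " := fun hl => hcase ⟨hx, hl⟩
          simp [pvGo, hpsv, hx, hl]
        · simp [pvGo, hpsv, hx]

-- ===== VERDICT (by name: the statement is the Claim_ definition above) =====
theorem filter_consecutive_whitespaces_spec : Claim_equal_filter_consecutive_whitespaces := by
  intro para _
  show filter_consecutive_whitespaces para = filter_consecutive_whitespaces_alt para
  rw [alt_eq_pvGo]
  have := a_foldl_eq_pvGo para [] para [] rfl
  simpa [filter_consecutive_whitespaces, pvPrevSpace] using this
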